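-- pv_equiv track=rewrite | github.com/INFJakZda/Information-Theory | WordProcessing/generator.py | getWordAfter
-- ===== SOURCE A (Python) =====
-- def getWordAfter(words, word):
--     list_words = []
--     len_word = len(word)
--     tmp_list = []
--     for i in range(0, len_word):
--         tmp_list.append(words[i])
--     for ele in range(len_word, len(words)):
--         if(tmp_list == word):
--             list_words.append(words[ele])
--         tmp_list.pop(0)
--         tmp_list.append(words[ele])
--     return list_words
-- ===== SOURCE B (Python) =====
-- def getWordAfter(words, word):
--     m = len(word)
--     out = []
--     for i, x in enumerate(words):
--         if x == word[m - 1] and i + 1 >= m and i + 1 < len(words) and words[i + 1 - m:i + 1] == word: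
--             out.append(words[i + 1])
--     return out
-- ===== Notes on version B (the rewrite author's own statement) =====
-- stated objective: alternative
-- what changed: B replaces A's two loops with a mutable rolling window (pop(0)/append) by a single enumerate pass that anchors on the pattern's last element and compares one slice per position.
import Mathlib
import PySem

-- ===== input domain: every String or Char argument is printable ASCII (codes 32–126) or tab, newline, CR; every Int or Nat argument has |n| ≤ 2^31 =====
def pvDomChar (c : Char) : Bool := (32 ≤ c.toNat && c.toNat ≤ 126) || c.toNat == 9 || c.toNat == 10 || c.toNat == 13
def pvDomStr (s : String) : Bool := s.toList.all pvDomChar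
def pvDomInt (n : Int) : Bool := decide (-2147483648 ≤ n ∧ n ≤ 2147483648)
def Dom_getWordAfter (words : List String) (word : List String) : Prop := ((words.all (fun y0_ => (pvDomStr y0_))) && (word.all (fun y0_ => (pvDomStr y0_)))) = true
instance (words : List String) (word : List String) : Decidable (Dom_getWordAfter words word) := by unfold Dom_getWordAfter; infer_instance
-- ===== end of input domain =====

-- B replaces A's mutable rolling window (pop(0)/append across two loops) by a single enumerate
-- pass that anchors on the pattern's last element and compares one slice per anchor hit
-- (objective: alternative — same worst-case cost, no window churn).

-- ===== PORT A =====
-- literal transliteration of A: build tmp_list from the first len(word) elements, then slide it,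
-- collecting words[ele] whenever the window equals word before shifting.
def getWordAfter (words : List String) (word : List String) : List String :=
  let lenWord : Int := (word.length : Int)
  let tmpList : List String :=
    (PySem.List.pyRange 0 lenWord 1).foldl
      (fun tmp i => tmp ++ [PySem.List.pyGetD words i ""]) []
  -- tmp_list.pop(0) is ported as .tail (Python raises on an empty tmp_list; Pre_ excludes that)
  let st :=
    (PySem.List.pyRange lenWord (words.length : Int) 1).foldl
      (fun (st : List String × List String) ele =>
        let listWords := if st.2 == word then st.1 ++ [PySem.List.pyGetD words ele ""] else st.1
        (listWords, st.2.tail ++ [PySem.List.pyGetD words ele ""]))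
      ([], tmpList)
  st.1

-- ===== PORT B =====
-- the loop condition of Source B at pair p = (i, x); word[m-1] is ported with pyGetD (Python raises
-- on an empty word with a nonempty words; Pre_ excludes that)
def pvBCond (words : List String) (word : List String) (p : Int × String) : Bool :=
  (p.2 == PySem.List.pyGetD word ((word.length : Int) - 1) "")
    && decide ((word.length : Int) ≤ p.1 + 1)
    && decide (p.1 + 1 < (words.length : Int))
    && (PySem.List.slice words (some (p.1 + 1 - (word.length : Int))) (some (p.1 + 1)) == word)

-- literal transliteration of Source B: one enumerate pass, append words[i+1] when the condition holds
def getWordAfter_alt (words : List String) (word : List String) : List String :=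
  (PySem.List.enumerate words 0).foldl
    (fun out p =>
      if pvBCond words word p then out ++ [PySem.List.pyGetD words (p.1 + 1) ""] else out)
    []

-- ===== PRECONDITION & SPEC =====
-- Pre_ excludes exactly the inputs where A raises IndexError: when words is shorter than word
-- (words[i] in the first loop), and when word is empty but words is not (tmp_list.pop(0) on []).
def Pre_getWordAfter (words : List String) (word : List String) : Prop :=
  word.length ≤ words.length ∧ (word = [] → words = [])
instance (words : List String) (word : List String) : Decidable (Pre_getWordAfter words word) := by
  unfold Pre_getWordAfter; infer_instance
def pvWitness_getWordAfter : List String × List String := (["a", "b", "a", "c"], ["a"])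

def Spec_getWordAfter (words : List String) (word : List String) (out : List String) : Prop := out = getWordAfter_alt words word
instance (words : List String) (word : List String) (out : List String) : Decidable (Spec_getWordAfter words word out) := by unfold Spec_getWordAfter; infer_instance

-- ===== CLAIM (what is proved, stated in full; the proofs are below) =====
def Claim_equal_getWordAfter : Prop := ∀ (words : List String) (word : List String), Dom_getWordAfter words word → Pre_getWordAfter words word → Spec_getWordAfter words word (getWordAfter words word)

-- ===== LEMMAS AND PROOFS =====

-- reference: matches listed by the position AFTER the match (key k = the index emitted),
-- for keys k, k+1, …, k+fuel-1
def pvRef (words word : List String) (k : Nat) : Nat → List String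
  | 0 => []
  | fuel + 1 =>
      (if word.length ≤ k ∧ k < words.length ∧
            (words.drop (k - word.length)).take word.length = word
       then [words.getD k ""] else [])
        ++ pvRef words word (k + 1) fuel

theorem pvRef_split (words word : List String) :
    ∀ (f1 : Nat) (k f2 : Nat),
      pvRef words word k (f1 + f2) = pvRef words word k f1 ++ pvRef words word (k + f1) f2 := by
  intro f1
  induction f1 with
  | zero => intro k f2; simp [pvRef]
  | succ f1 ih =>
      intro k f2
      rw [show f1 + 1 + f2 = (f1 + f2) + 1 by omega,
          show k + (f1 + 1) = (k + 1) + f1 by omega]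
      simp only [pvRef]
      rw [ih (k + 1) f2, List.append_assoc]

theorem pvRef_nil_low (words word : List String) :
    ∀ (fuel k : Nat), k + fuel ≤ word.length → pvRef words word k fuel = [] := by
  intro fuel
  induction fuel with
  | zero => intro k _; rfl
  | succ fuel ih =>
      intro k h
      simp only [pvRef]
      rw [if_neg (by omega), ih (k + 1) (by omega)]
      rfl

theorem pvRef_nil_high (words word : List String) :
    ∀ (fuel k : Nat), words.length ≤ k → pvRef words word k fuel = [] := by
  intro fuel
  induction fuel with
  | zero => intro k _; rfl
  | succ fuel ih =>
      intro k h
      simp only [pvRef]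
      rw [if_neg (by omega), ih (k + 1) (by omega)]
      rfl

-- the sliding window advances: tail of the window at j, extended by words[j+m], is the window at j+1
theorem pvWindow_step (words word : List String) (j : Nat)
    (hm : 0 < word.length) (hjn : j + word.length < words.length) :
    ((words.drop j).take word.length).tail ++ [words.getD (j + word.length) ""]
      = (words.drop (j + 1)).take word.length := by
  have hlt : word.length - 1 < (words.drop (j + 1)).length := by
    simp [List.length_drop]; omega
  have htail : ((words.drop j).take word.length).tail
      = (words.drop (j + 1)).take (word.length - 1) := by
    rw [← List.drop_one, List.drop_take, List.drop_drop]
  have hsplit : (words.drop (j + 1)).take word.length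
      = (words.drop (j + 1)).take (word.length - 1) ++ [(words.drop (j + 1))[word.length - 1]] := by
    conv_lhs => rw [show word.length = (word.length - 1) + 1 by omega]
    exact List.take_succ_eq_append_getElem hlt
  rw [htail, hsplit]
  congr 2
  rw [List.getElem_drop, List.getD_eq_getElem _ _ (by omega : j + word.length < words.length)]
  congr 1; omega

-- A's main loop, started with the window at position j, emits exactly pvRef's keys j+m, …, n-1
theorem pvA_loop (words word : List String) (hm : 0 < word.length) :
    ∀ (fuel j : Nat) (acc : List String), j + word.length + fuel = words.length →
      ((PySem.List.pyRange ((j + word.length : Nat) : Int) ((words.length : Int)) 1).foldl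
          (fun (st : List String × List String) ele =>
            (if st.2 == word then st.1 ++ [PySem.List.pyGetD words ele ""] else st.1,
             st.2.tail ++ [PySem.List.pyGetD words ele ""]))
          (acc, (words.drop j).take word.length)).1
        = acc ++ pvRef words word (j + word.length) fuel := by
  intro fuel
  induction fuel with
  | zero =>
      intro j acc h
      rw [PySem.List.pyRange_one_eq_nil (by push_cast; omega)]
      simp [pvRef]
  | succ fuel ih =>
      intro j acc h
      rw [PySem.List.pyRange_one_cons (by push_cast; omega)]
      simp only [List.foldl_cons]
      have hget : PySem.List.pyGetD words ((j + word.length : Nat) : Int) ""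
          = words.getD (j + word.length) "" := by
        rw [PySem.List.pyGetD_natCast]
      have hstep := pvWindow_step words word j hm (by omega)
      have hrange : ((j + word.length : Nat) : Int) + 1 = ((j + 1 + word.length : Nat) : Int) := by
        push_cast; ring
      by_cases hmatch : ((words.drop j).take word.length == word) = true
      · have hmatch' : (words.drop j).take word.length = word := beq_iff_eq.mp hmatch
        have hpv : pvRef words word (j + word.length) (fuel + 1)
            = [words.getD (j + word.length) ""] ++ pvRef words word (j + word.length + 1) fuel := by
          simp only [pvRef]
          rw [if_pos ⟨by omega, by omega,
            by rw [show j + word.length - word.length = j by omega]; exact hmatch'⟩]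
        simp only [hmatch, if_pos, hget, hstep, hrange]
        rw [ih (j + 1) (acc ++ [words.getD (j + word.length) ""]) (by omega),
            show j + 1 + word.length = j + word.length + 1 by omega, hpv]
        simp
      · have hmatch' : ¬ (words.drop j).take word.length = word := by
          simpa using hmatch
        have hpv : pvRef words word (j + word.length) (fuel + 1)
            = pvRef words word (j + word.length + 1) fuel := by
          simp only [pvRef]
          rw [if_neg (fun hg =>
            hmatch' (by rw [show j = j + word.length - word.length by omega]; exact hg.2.2))]
          rfl
        simp only [hmatch, Bool.false_eq_true, if_neg, not_false_iff, hget, hstep, hrange]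
        rw [ih (j + 1) acc (by omega),
            show j + 1 + word.length = j + word.length + 1 by omega, hpv]

-- A's first loop builds the initial window words.take m
theorem pvA_init (words word : List String) (hmn : word.length ≤ words.length) :
    (PySem.List.pyRange 0 ((word.length : Nat) : Int) 1).foldl
        (fun tmp i => tmp ++ [PySem.List.pyGetD words i ""]) []
      = words.take word.length := by
  rw [PySem.List.foldl_append_singleton_eq_map]
  rw [PySem.List.pyRange_one]
  simp only [sub_zero, Int.toNat_natCast, List.map_map]
  refine List.ext_getElem ?_ ?_
  · simp [List.length_map, List.length_take]; omega
  · intro k h1 h2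
    simp only [List.nil_append, List.getElem_map, Function.comp_apply, List.getElem_range,
      List.getElem_take]
    rw [show ((0 : Int) + (k : Int)) = ((k : Nat) : Int) by ring,
        PySem.List.pyGetD_natCast, List.getD_eq_getElem]

-- B's condition at element index k (holding words[k]) is pvRef's guard at key k+1
theorem pvCond_iff (words word : List String) (k : Nat)
    (hm : 0 < word.length) (hk : k < words.length) :
    pvBCond words word ((k : Int), words[k]) = true
      ↔ (word.length ≤ k + 1 ∧ k + 1 < words.length ∧
          (words.drop (k + 1 - word.length)).take word.length = word) := by
  unfold pvBCond
  simp only [Bool.and_eq_true, beq_iff_eq, decide_eq_true_eq]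
  by_cases h1 : word.length ≤ k + 1
  · by_cases h2 : k + 1 < words.length
    · have hslice : PySem.List.slice words (some ((k : Int) + 1 - (word.length : Int)))
          (some ((k : Int) + 1))
          = (words.drop (k + 1 - word.length)).take word.length := by
        rw [show ((k : Int) + 1 - (word.length : Int)) = ((k + 1 - word.length : Nat) : Int) by omega,
            show ((k : Int) + 1) = ((k + 1 : Nat) : Int) by omega,
            PySem.List.slice_natCast]
        congr 1
        omega
      have hgetw : PySem.List.pyGetD word ((word.length : Int) - 1) ""
          = word.getD (word.length - 1) "" := by
        rw [show ((word.length : Int) - 1) = ((word.length - 1 : Nat) : Int) by omega,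
            PySem.List.pyGetD_natCast]
      rw [hslice, hgetw]
      constructor
      · rintro ⟨⟨⟨_, _⟩, _⟩, hw⟩
        exact ⟨h1, h2, hw⟩
      · rintro ⟨_, _, hw⟩
        refine ⟨⟨⟨?_, by omega⟩, by omega⟩, hw⟩
        -- words[k] is the last element of the matched window, i.e. word's last element
        have hlen : word.length - 1 < ((words.drop (k + 1 - word.length)).take word.length).length := by
          simp [List.length_take, List.length_drop]; omega
        have hidx : ((words.drop (k + 1 - word.length)).take word.length)[word.length - 1]'hlen
            = words[k] := by
          rw [List.getElem_take, List.getElem_drop]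
          congr 1
          omega
        have h3 : ((words.drop (k + 1 - word.length)).take word.length).getD
            (word.length - 1) "" = words[k] := by
          rw [List.getD_eq_getElem _ _ hlen]
          exact hidx
        have hval : word.getD (word.length - 1) "" = words[k] := by
          rw [show word.getD (word.length - 1) ""
                = ((words.drop (k + 1 - word.length)).take word.length).getD
                    (word.length - 1) "" by rw [hw]]
          exact h3
        rw [hval]
    · constructor
      · rintro ⟨⟨⟨_, _⟩, hlt⟩, _⟩
        omega
      · rintro ⟨_, hlt, _⟩
        omega
  · constructor
    · rintro ⟨⟨⟨_, hle⟩, _⟩, _⟩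
      omega
    · rintro ⟨hle, _, _⟩
      omega

-- B's loop body accumulated over a suffix of words (as enumerate yields it), as a recursion
def pvColB (words word : List String) : List String → Nat → List String
  | [], _ => []
  | x :: r, k =>
      (if pvBCond words word ((k : Int), x) then [PySem.List.pyGetD words ((k : Int) + 1) ""] else [])
        ++ pvColB words word r (k + 1)

theorem pvB_loop (words word : List String) :
    ∀ (l : List String) (k : Nat) (acc : List String),
      (PySem.List.enumerate l (k : Int)).foldl
          (fun out p =>
            if pvBCond words word p then out ++ [PySem.List.pyGetD words (p.1 + 1) ""] else out)
          acc
        = acc ++ pvColB words word l k := by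
  intro l
  induction l with
  | nil => intro k acc; simp [PySem.List.enumerate_nil, pvColB]
  | cons x r ih =>
      intro k acc
      rw [PySem.List.enumerate_cons]
      simp only [List.foldl_cons]
      rw [show ((k : Int) + 1) = ((k + 1 : Nat) : Int) by push_cast; ring]
      by_cases hc : pvBCond words word ((k : Int), x) = true
      · simp only [hc, if_pos]
        rw [ih (k + 1)]
        simp [pvColB, hc]
      · simp only [hc, Bool.false_eq_true, if_neg, not_false_iff]
        rw [ih (k + 1)]
        simp [pvColB, hc]

theorem pvColB_eq_pvRef (words word : List String) (hm : 0 < word.length) :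
    ∀ (l : List String) (k : Nat), l = words.drop k →
      pvColB words word l k = pvRef words word (k + 1) l.length := by
  intro l
  induction l with
  | nil => intro k _; rfl
  | cons x r ih =>
      intro k hl
      have hk : k < words.length := by
        by_contra hge
        have h0 : words.drop k = [] := List.drop_eq_nil_iff.mpr (by omega)
        rw [h0] at hl
        exact List.cons_ne_nil x r hl
      rw [List.drop_eq_getElem_cons hk] at hl
      injection hl with h1 h2
      subst h2
      subst h1
      simp only [pvColB, List.length_cons]
      conv_rhs => rw [pvRef]
      rw [ih (k + 1) rfl]
      congr 1
      by_cases hg : word.length ≤ k + 1 ∧ k + 1 < words.length ∧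
          (words.drop (k + 1 - word.length)).take word.length = word
      · rw [if_pos ((pvCond_iff words word k hm hk).mpr hg), if_pos hg]
        rw [show ((k : Int) + 1) = ((k + 1 : Nat) : Int) by push_cast; ring,
            PySem.List.pyGetD_natCast]
      · rw [if_neg (fun hc => hg ((pvCond_iff words word k hm hk).mp hc)), if_neg hg]

-- ===== VERDICT (by name: the statement is the Claim_ definition above) =====
theorem getWordAfter_spec : Claim_equal_getWordAfter := by
  intro words word _hdom hpre
  obtain ⟨hlen, hempty⟩ := hpre
  unfold Spec_getWordAfter getWordAfter getWordAfter_alt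
  by_cases hm : word.length = 0
  · have hw : word = [] := List.eq_nil_of_length_eq_zero hm
    have hws : words = [] := hempty hw
    subst hw hws
    rfl
  · have hm' : 0 < word.length := Nat.pos_of_ne_zero hm
    simp only []
    have hA := pvA_loop words word hm' (words.length - word.length) 0 [] (by omega)
    simp only [Nat.zero_add, List.drop_zero] at hA
    rw [pvA_init words word hlen, hA]
    have hB := pvB_loop words word words 0 []
    rw [show ((0 : Int)) = ((0 : Nat) : Int) by norm_num, hB,
        pvColB_eq_pvRef words word hm' words 0 (by simp)]
    have hsplit1 : pvRef words word (0 + 1) words.length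
        = pvRef words word 1 (word.length - 1)
          ++ pvRef words word (1 + (word.length - 1)) (words.length - word.length + 1) := by
      rw [← pvRef_split words word (word.length - 1) 1 (words.length - word.length + 1)]
      congr 1
      omega
    have hsplit2 : pvRef words word (1 + (word.length - 1)) (words.length - word.length + 1)
        = pvRef words word word.length (words.length - word.length)
          ++ pvRef words word (word.length + (words.length - word.length)) 1 := by
      rw [← pvRef_split words word (words.length - word.length) word.length 1,
          show 1 + (word.length - 1) = word.length by omega]
    rw [hsplit1, hsplit2,
        pvRef_nil_low words word (word.length - 1) 1 (by omega),
        pvRef_nil_high words word 1 (word.length + (words.length - word.length)) (by omega)]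
    simp
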